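-- pv_equiv track=rewrite | github.com/lexa5575/AgentOC | tools/structure_analyzer.py | _extract_sample_rows
-- ===== SOURCE A (Python) =====
-- _HEADER_WORDS = {
--     "farik", "maks", "макс", "никита", "nikita", "la maks",
--     "chicago max", "chi maks", "arrived",
--     "customer", "discount", "lost", "refund",
-- }
--
-- _SAMPLE_ROWS = 5
--
-- def _get_cell(row: list, col: int) -> str:
--     """Safely get cell value as string."""
--     if col < len(row):
--         val = row[col]
--         return str(val).strip() if val is not None else ""
--     return ""
--
-- def _is_header_row(cells: list) -> bool:
--     """Check if row is a header (Farik/Maks/etc.), not a product row."""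
--     text = " ".join(str(c).strip() for c in cells if c).lower()
--     return any(hw in text for hw in _HEADER_WORDS)
--
-- def _extract_sample_rows(
--     matrix: list[list],
--     marker_row: int,
--     col_start: int,
--     col_end: int,
-- ) -> tuple[list[list], list[int]]:
--     """Extract sample product rows below a marker for LLM hints.
--
--     Skips header rows, collects up to _SAMPLE_ROWS product rows.
--     """
--     samples = []
--     indices = []
--     col_end_safe = min(col_end + 1, 30)  # Tight boundary to avoid adjacent zone data
--
--     for r in range(marker_row + 1, min(marker_row + 20, len(matrix))):
--         row = matrix[r] if r < len(matrix) else []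
--
--         # Extract sub-row
--         subrow = []
--         for c in range(max(0, col_start - 2), col_end_safe):
--             subrow.append(_get_cell(row, c) if c < len(row) else "")
--
--         # Skip empty rows
--         if not any(v for v in subrow):
--             break
--
--         # Skip header rows
--         if _is_header_row(subrow):
--             continue
--
--         samples.append(subrow)
--         indices.append(r)
--
--         if len(samples) >= _SAMPLE_ROWS:
--             break
--
--     return samples, indices
-- ===== SOURCE B (Python) =====
-- _HEADER_WORDS = {
--     "farik", "maks", "макс", "никита", "nikita", "la maks",
--     "chicago max", "chi maks", "arrived",
--     "customer", "discount", "lost", "refund",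
-- }
--
-- _SAMPLE_ROWS = 5
--
-- def _cell_text(row, c):
--     if 0 <= c < len(row) and row[c] is not None:
--         return str(row[c]).strip()
--     return ""
--
-- def _row_blank(row, cols):
--     return all(not _cell_text(row, c) for c in cols)
--
-- def _row_is_header(row, cols):
--     text = " ".join(w for w in (_cell_text(row, c) for c in cols) if w).lower()
--     return any(hw in text for hw in _HEADER_WORDS)
--
-- def _extract_sample_rows(matrix, marker_row, col_start, col_end):
--     cols = range(max(0, col_start - 2), min(col_end + 1, 30))
--     rows = range(marker_row + 1, min(marker_row + 20, len(matrix)))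
--     # cut the scan at the first blank row (predicate on the matrix, no sub-rows built)
--     end = next((r for r in rows if _row_blank(matrix[r], cols)), rows.stop)
--     indices = [r for r in range(rows.start, end)
--                if not _row_is_header(matrix[r], cols)][:_SAMPLE_ROWS]
--     samples = [[_cell_text(matrix[r], c) for c in cols] for r in indices]
--     return samples, indices
-- ===== Notes on version B (the rewrite author's own statement) =====
-- stated objective: alternative
-- what changed: A runs one accumulator loop that materialises every sub-row, skips headers inline and breaks at a count of 5; B works on row indices: it locates the first blank row with a predicate on the matrix, filters header rows out of the index range, truncates to 5, and only then builds the at-most-5 sub-rows.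
import Mathlib
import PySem

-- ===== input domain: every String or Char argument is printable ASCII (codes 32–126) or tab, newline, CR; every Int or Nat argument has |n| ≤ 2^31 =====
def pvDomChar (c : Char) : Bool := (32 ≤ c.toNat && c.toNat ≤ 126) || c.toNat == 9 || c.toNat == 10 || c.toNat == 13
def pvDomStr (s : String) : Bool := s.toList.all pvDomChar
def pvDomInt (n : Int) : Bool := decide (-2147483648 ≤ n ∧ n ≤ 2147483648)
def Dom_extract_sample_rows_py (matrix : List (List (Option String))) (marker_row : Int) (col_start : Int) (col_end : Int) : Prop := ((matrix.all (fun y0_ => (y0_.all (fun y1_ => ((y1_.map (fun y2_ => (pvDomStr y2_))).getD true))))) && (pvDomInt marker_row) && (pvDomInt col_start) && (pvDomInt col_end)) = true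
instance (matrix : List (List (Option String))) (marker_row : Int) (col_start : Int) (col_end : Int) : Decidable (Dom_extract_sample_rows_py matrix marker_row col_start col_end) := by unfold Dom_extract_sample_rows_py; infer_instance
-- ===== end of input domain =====

-- B replaces A's accumulator loop (per-row subrow built, count-based break) by an index pipeline:
-- find the first blank row (a predicate on the matrix), filter header rows out of the index range,
-- truncate to 5, and only then materialise the ≤5 sub-rows; same return value (alternative decomposition).

-- the module-level _HEADER_WORDS set literal (distinct literals; `any` over a set is order-independent)
def pvHeaderWords : List String :=
  ["farik", "maks", "макс", "никита", "nikita", "la maks",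
   "chicago max", "chi maks", "arrived",
   "customer", "discount", "lost", "refund"]

-- ===== PORT A =====
-- _get_cell
def pvGetCellA (row : List (Option String)) (col : Int) : String :=
  if col < PySem.List.len row then
    match PySem.List.pyGetD row col none with   -- row[col]; in range whenever called (0 ≤ col < len)
    | some v => PySem.Str.strip v
    | none => ""
  else ""

-- _is_header_row
def pvIsHeaderA (cells : List String) : Bool :=
  let text := PySem.Str.lower (PySem.Str.join " "
    ((cells.filter (fun c => c != "")).map (fun c => PySem.Str.strip c)))
  pvHeaderWords.any (fun hw => PySem.Str.isIn hw text)

-- the `for r in range(...)` loop with its breaks, carrying samples/indices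
def pvLoopA (matrix : List (List (Option String))) (lo hi : Int) :
    List Int → List (List String) → List Int → List (List String) × List Int
  | [], samples, indices => (samples, indices)
  | r :: rest, samples, indices =>
    let row := if r < PySem.List.len matrix then PySem.List.pyGetD matrix r [] else []
    let subrow := (PySem.List.pyRange lo hi 1).map
      (fun c => if c < PySem.List.len row then pvGetCellA row c else "")
    if !(subrow.any (fun v => v != "")) then (samples, indices)       -- if not any(...): break
    else if pvIsHeaderA subrow then pvLoopA matrix lo hi rest samples indices  -- continue
    else
      let samples' := samples ++ [subrow]
      let indices' := indices ++ [r]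
      if 5 ≤ samples'.length then (samples', indices')                -- len(samples) >= _SAMPLE_ROWS: break
      else pvLoopA matrix lo hi rest samples' indices'

def extract_sample_rows_py (matrix : List (List (Option String))) (marker_row : Int) (col_start : Int) (col_end : Int) : List (List String) × List Int :=
  let col_end_safe := min (col_end + 1) 30
  pvLoopA matrix (max 0 (col_start - 2)) col_end_safe
    (PySem.List.pyRange (marker_row + 1) (min (marker_row + 20) (PySem.List.len matrix)) 1) [] []

-- ===== PORT B =====
-- _cell_text
def pvCellText (row : List (Option String)) (c : Int) : String :=
  if 0 ≤ c ∧ c < PySem.List.len row then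
    match PySem.List.pyGetD row c none with     -- row[c]; in range under the guard
    | some v => PySem.Str.strip v
    | none => ""                                -- the `row[c] is not None` part of the guard failed
  else ""

-- _row_blank
def pvRowBlank (row : List (Option String)) (cols : List Int) : Bool :=
  cols.all (fun c => pvCellText row c == "")

-- _row_is_header
def pvRowIsHeaderB (row : List (Option String)) (cols : List Int) : Bool :=
  let text := PySem.Str.lower (PySem.Str.join " "
    ((cols.map (fun c => pvCellText row c)).filter (fun w => w != "")))
  pvHeaderWords.any (fun hw => PySem.Str.isIn hw text)

def extract_sample_rows_py_alt (matrix : List (List (Option String))) (marker_row : Int) (col_start : Int) (col_end : Int) : List (List String) × List Int :=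
  let cols := PySem.List.pyRange (max 0 (col_start - 2)) (min (col_end + 1) 30) 1
  let start := marker_row + 1
  let stop := min (marker_row + 20) (PySem.List.len matrix)
  let rows := PySem.List.pyRange start stop 1
  -- end = next((r for r in rows if _row_blank(matrix[r], cols)), rows.stop)
  let endIdx := (rows.find? (fun r => pvRowBlank (PySem.List.pyGetD matrix r []) cols)).getD stop
  let indices := ((PySem.List.pyRange start endIdx 1).filter
      (fun r => !pvRowIsHeaderB (PySem.List.pyGetD matrix r []) cols)).take 5
  (indices.map (fun r => cols.map (fun c => pvCellText (PySem.List.pyGetD matrix r []) c)), indices)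

-- ===== PRECONDITION & SPEC =====
-- Pre_ excludes exactly the inputs where Python A raises IndexError: when marker_row + 1 < -len(matrix)
-- the scan's first index r = marker_row + 1 makes matrix[r] an out-of-range negative index.
def Pre_extract_sample_rows_py (matrix : List (List (Option String))) (marker_row : Int) (col_start : Int) (col_end : Int) : Prop :=
  -(PySem.List.len matrix) ≤ marker_row + 1
instance (matrix : List (List (Option String))) (marker_row : Int) (col_start : Int) (col_end : Int) : Decidable (Pre_extract_sample_rows_py matrix marker_row col_start col_end) := by unfold Pre_extract_sample_rows_py; infer_instance

def pvWitness_extract_sample_rows_py : List (List (Option String)) × Int × Int × Int :=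
  ([[some "a"]], -1, 0, 0)

def Spec_extract_sample_rows_py (matrix : List (List (Option String))) (marker_row : Int) (col_start : Int) (col_end : Int) (out : List (List String) × List Int) : Prop := out = extract_sample_rows_py_alt matrix marker_row col_start col_end
instance (matrix : List (List (Option String))) (marker_row : Int) (col_start : Int) (col_end : Int) (out : List (List String) × List Int) : Decidable (Spec_extract_sample_rows_py matrix marker_row col_start col_end out) := by unfold Spec_extract_sample_rows_py; infer_instance

-- ===== CLAIM (what is proved, stated in full; the proofs are below) =====
def Claim_equal_extract_sample_rows_py : Prop := ∀ (matrix : List (List (Option String))) (marker_row : Int) (col_start : Int) (col_end : Int), Dom_extract_sample_rows_py matrix marker_row col_start col_end → Pre_extract_sample_rows_py matrix marker_row col_start col_end → Spec_extract_sample_rows_py matrix marker_row col_start col_end (extract_sample_rows_py matrix marker_row col_start col_end)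

-- ===== LEMMAS AND PROOFS =====

-- stripping is idempotent (Chars level), so the extra strip in A's _is_header_row is the identity
theorem pv_lstrip_rstrip_lstrip (cs : List Char) :
    PySem.Chars.lstrip (PySem.Chars.rstrip (PySem.Chars.lstrip cs)) =
      PySem.Chars.rstrip (PySem.Chars.lstrip cs) := by
  simp only [PySem.Chars.lstrip, PySem.Chars.rstrip]
  rw [List.dropWhile_eq_self_iff]
  intro hl hp
  rcases hd : List.dropWhile PySem.Chars.isspace cs with _ | ⟨a, t⟩
  · simp [hd] at hl
  · have hpa : PySem.Chars.isspace a = false := by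
      have := List.head_dropWhile_not PySem.Chars.isspace (l := cs) (by simp [hd])
      simpa [hd] using this
    -- the reversed-dropWhile list is a suffix of (a :: t).reverse, so its last element is a
    have hsuf := List.dropWhile_suffix (l := (a :: t).reverse) PySem.Chars.isspace
    obtain ⟨pre, hpre⟩ := hsuf
    simp only [hd] at hl hp
    set d := List.dropWhile PySem.Chars.isspace (a :: t).reverse with hdd
    have hdne : d ≠ [] := by
      intro h; rw [h] at hl; simp at hl
    have hlast : d.getLast? = some a := by
      have h1 : ((a :: t).reverse).getLast? = some a := by
        rw [List.getLast?_reverse]; rfl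
      rw [← hpre] at h1
      rwa [List.getLast?_append_of_ne_nil pre hdne] at h1
    have h00 : d.reverse[0]? = some a := by
      rw [← List.head?_eq_getElem?, List.head?_reverse]; exact hlast
    obtain ⟨hlt0, heq⟩ := List.getElem?_eq_some_iff.mp h00
    rw [heq, hpa] at hp
    exact Bool.false_ne_true hp

theorem pv_strip_idem (cs : List Char) :
    PySem.Chars.strip (PySem.Chars.strip cs) = PySem.Chars.strip cs := by
  show PySem.Chars.rstrip (PySem.Chars.lstrip (PySem.Chars.rstrip (PySem.Chars.lstrip cs)))
      = PySem.Chars.rstrip (PySem.Chars.lstrip cs)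
  rw [pv_lstrip_rstrip_lstrip]
  simp only [PySem.Chars.rstrip, List.reverse_reverse]
  rw [List.dropWhile_idempotent]

theorem pv_str_strip_idem (s : String) :
    PySem.Str.strip (PySem.Str.strip s) = PySem.Str.strip s := by
  apply String.toList_inj.mp
  simp only [PySem.Str.toList_strip]
  exact pv_strip_idem s.toList

-- every value _cell_text produces is strip-fixed
theorem pv_cellText_strip (row : List (Option String)) (c : Int) :
    PySem.Str.strip (pvCellText row c) = pvCellText row c := by
  unfold pvCellText
  split_ifs with h
  · cases PySem.List.pyGetD row c none with
    | none => rfl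
    | some v => exact pv_str_strip_idem v
  · rfl

-- A's cell on an in-window column equals B's _cell_text
theorem pv_cell_eq (row : List (Option String)) (c : Int) (hc : 0 ≤ c) :
    (if c < PySem.List.len row then pvGetCellA row c else "") = pvCellText row c := by
  unfold pvGetCellA pvCellText
  by_cases h : c < PySem.List.len row
  · rw [if_pos h, if_pos h, if_pos ⟨hc, h⟩]
  · rw [if_neg h, if_neg (fun hh : 0 ≤ c ∧ c < PySem.List.len row => h hh.2)]

theorem pv_subrow_eq (row : List (Option String)) (lo hi : Int) (hlo : 0 ≤ lo) :
    (PySem.List.pyRange lo hi 1).map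
        (fun c => if c < PySem.List.len row then pvGetCellA row c else "") =
      (PySem.List.pyRange lo hi 1).map (fun c => pvCellText row c) := by
  apply List.map_congr_left
  intro c hc
  exact pv_cell_eq row c (le_trans hlo ((PySem.List.mem_pyRange_one).mp hc).1)

-- A's header test on the materialised sub-row equals B's index-based header test
theorem pv_header_eq (row : List (Option String)) (cols : List Int) :
    pvIsHeaderA (cols.map (fun c => pvCellText row c)) = pvRowIsHeaderB row cols := by
  unfold pvIsHeaderA pvRowIsHeaderB
  have : ((cols.map (fun c => pvCellText row c)).filter (fun c => c != "")).map
      (fun c => PySem.Str.strip c) =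
      (cols.map (fun c => pvCellText row c)).filter (fun w => w != "") := by
    rw [List.map_eq_iff]
    intro i
    cases hx : ((cols.map (fun c => pvCellText row c)).filter (fun w => w != ""))[i]? with
    | none => rfl
    | some w =>
      have hw : w ∈ cols.map (fun c => pvCellText row c) :=
        List.mem_of_mem_filter (List.mem_of_getElem? hx)
      obtain ⟨c, _, hc⟩ := List.mem_map.mp hw
      simp [← hc, pv_cellText_strip]
  rw [this]

-- A's break test equals B's _row_blank
theorem pv_blank_eq (row : List (Option String)) (cols : List Int) :
    (!((cols.map (fun c => pvCellText row c)).any (fun v => v != ""))) =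
      pvRowBlank row cols := by
  unfold pvRowBlank
  rw [List.any_map]
  induction cols with
  | nil => rfl
  | cons a t ih =>
    simp only [Function.comp_def, List.any_cons, List.all_cons, Bool.not_or] at ih ⊢
    rw [ih]
    simp only [bne, Bool.not_not]

-- range(start, first-blank-or-stop) is the takeWhile prefix of range(start, stop)
theorem pv_range_find (p : Int → Bool) (a b : Int) :
    PySem.List.pyRange a (((PySem.List.pyRange a b 1).find? p).getD b) 1
      = (PySem.List.pyRange a b 1).takeWhile (fun r => !p r) := by
  by_cases hab : a < b
  · rw [PySem.List.pyRange_one_cons hab]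
    by_cases hpa : p a
    · simp only [List.find?_cons, hpa, Option.getD_some, List.takeWhile_cons, Bool.not_true,
        Bool.false_eq_true, if_false]
      simp [PySem.List.pyRange]
    · have hrec := pv_range_find p (a + 1) b
      simp only [List.find?_cons, hpa, List.takeWhile_cons, Bool.not_false, if_true]
      have hlt : a < ((PySem.List.pyRange (a + 1) b 1).find? p).getD b := by
        cases hf : (PySem.List.pyRange (a + 1) b 1).find? p with
        | none => simpa using hab
        | some r =>
          have := (PySem.List.mem_pyRange_one).mp (List.mem_of_find?_eq_some hf)
          simp; omega
      rw [PySem.List.pyRange_one_cons hlt, hrec]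
  · have h1 : PySem.List.pyRange a b 1 = [] := by
      simp [PySem.List.pyRange]; omega
    have h2 : PySem.List.pyRange a b 1 = PySem.List.pyRange a (((PySem.List.pyRange a b 1).find? p).getD b) 1 := by
      rw [h1]; simp [PySem.List.pyRange]; omega
    rw [← h2, h1]
    rfl
termination_by (b - a).toNat
decreasing_by omega

-- the row indices B keeps
def pvKeptB (matrix : List (List (Option String))) (cols : List Int) (rs : List Int) : List Int :=
  (rs.takeWhile (fun r => !pvRowBlank (PySem.List.pyGetD matrix r []) cols)).filter
    (fun r => !pvRowIsHeaderB (PySem.List.pyGetD matrix r []) cols)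

-- the loop of A, characterised by B's pipeline
theorem pv_loop_eq (matrix : List (List (Option String))) (lo hi : Int) (hlo : 0 ≤ lo) :
    ∀ (rs : List Int), (∀ r ∈ rs, r < PySem.List.len matrix) →
    ∀ (samples : List (List String)) (indices : List Int), samples.length < 5 →
      pvLoopA matrix lo hi rs samples indices =
        (samples ++ ((pvKeptB matrix (PySem.List.pyRange lo hi 1) rs).take (5 - samples.length)).map
            (fun r => (PySem.List.pyRange lo hi 1).map (fun c => pvCellText (PySem.List.pyGetD matrix r []) c)),
         indices ++ (pvKeptB matrix (PySem.List.pyRange lo hi 1) rs).take (5 - samples.length))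
  | [], _, samples, indices, _ => by simp [pvLoopA, pvKeptB]
  | r :: rest, hlt, samples, indices, hlen => by
    have hr : r < PySem.List.len matrix := hlt r (.head _)
    have hrest : ∀ r' ∈ rest, r' < PySem.List.len matrix := fun r' h => hlt r' (.tail _ h)
    rw [pvLoopA]
    simp only [hr, if_pos, pv_subrow_eq _ lo hi hlo]
    rw [pv_blank_eq, pv_header_eq]
    unfold pvKeptB
    rw [List.takeWhile_cons]
    by_cases hbl : pvRowBlank (PySem.List.pyGetD matrix r []) (PySem.List.pyRange lo hi 1) = true
    · simp [hbl]
    · simp only [hbl, Bool.not_false, Bool.false_eq_true, if_false, if_true, List.filter_cons]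
      by_cases hhd : pvRowIsHeaderB (PySem.List.pyGetD matrix r []) (PySem.List.pyRange lo hi 1) = true
      · simp only [hhd, if_true, Bool.not_true, Bool.false_eq_true, if_false]
        have ih := pv_loop_eq matrix lo hi hlo rest hrest samples indices hlen
        unfold pvKeptB at ih
        exact ih
      · simp only [Bool.not_eq_true] at hhd
        simp only [hhd, Bool.false_eq_true, if_false, Bool.not_false, if_true]
        have hstep : 5 - samples.length = (5 - (samples.length + 1)) + 1 := by omega
        rw [hstep, List.take_succ_cons]
        by_cases hfull : 5 ≤ (samples ++ [(PySem.List.pyRange lo hi 1).map (fun c => pvCellText (PySem.List.pyGetD matrix r []) c)]).length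
        · have h4 : samples.length = 4 := by simp at hfull; omega
          rw [if_pos hfull]
          simp [h4]
        · rw [if_neg hfull]
          have ih := pv_loop_eq matrix lo hi hlo rest hrest
            (samples ++ [(PySem.List.pyRange lo hi 1).map (fun c => pvCellText (PySem.List.pyGetD matrix r []) c)]) (indices ++ [r])
            (by simp at hfull ⊢; omega)
          unfold pvKeptB at ih
          rw [ih]
          simp

-- ===== VERDICT (by name: the statement is the Claim_ definition above) =====
theorem extract_sample_rows_py_spec : Claim_equal_extract_sample_rows_py := by
  intro matrix marker_row col_start col_end _ _
  simp only [Spec_extract_sample_rows_py, extract_sample_rows_py, extract_sample_rows_py_alt]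
  rw [pv_range_find]
  rw [pv_loop_eq matrix (max 0 (col_start - 2)) (min (col_end + 1) 30) (le_max_left 0 _)
    _ (fun r hrm => lt_of_lt_of_le ((PySem.List.mem_pyRange_one).mp hrm).2 (min_le_right _ _))
    [] [] (by norm_num)]
  unfold pvKeptB
  simp [List.map_take]
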